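-- pv_equiv track=rewrite | github.com/thomasnormal/circt | utils/mutation_mcy/lib/native_mutation_plan.py | build_code_mask
-- ===== SOURCE A (Python) =====
-- def build_code_mask(text: str) -> list[bool]:
--     mask = [True] * len(text)
--     state = "normal"
--     escape = False
--     i = 0
--     n = len(text)
--     while i < n:
--         ch = text[i]
--         if state == "normal":
--             if ch == "/" and i + 1 < n and text[i + 1] == "/":
--                 mask[i] = False
--                 mask[i + 1] = False
--                 i += 2
--                 state = "line_comment"
--                 continue
--             if ch == "/" and i + 1 < n and text[i + 1] == "*":
--                 mask[i] = False
--                 mask[i + 1] = False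
--                 i += 2
--                 state = "block_comment"
--                 continue
--             if ch == '"':
--                 mask[i] = False
--                 state = "string"
--                 escape = False
--                 i += 1
--                 continue
--             i += 1
--             continue
--         if state == "line_comment":
--             if ch != "\n":
--                 mask[i] = False
--             else:
--                 state = "normal"
--             i += 1
--             continue
--         if state == "block_comment":
--             mask[i] = False
--             if ch == "*" and i + 1 < n and text[i + 1] == "/":
--                 mask[i + 1] = False
--                 i += 2
--                 state = "normal"
--                 continue
--             i += 1
--             continue
--         if state == "string":
--             mask[i] = False
--             if escape:
--                 escape = False
--                 i += 1
--                 continue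
--             if ch == "\\":
--                 escape = True
--                 i += 1
--                 continue
--             if ch == '"':
--                 state = "normal"
--             i += 1
--             continue
--     return mask
-- ===== SOURCE B (Python) =====
-- def _string_end(text: str, pos: int) -> int:
--     """Index just past the closing quote of a string whose opening quote is at pos-1."""
--     n = len(text)
--     while pos < n:
--         c = text[pos]
--         if c == "\\":
--             pos += 2
--         elif c == '"':
--             return pos + 1
--         else:
--             pos += 1
--     return n
--
--
-- def build_code_mask(text: str) -> list[bool]:
--     out: list[bool] = []
--     i, n = 0, len(text)
--     while i < n:
--         if text.startswith("//", i):
--             j = text.find("\n", i)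
--             j = n if j == -1 else j           # newline itself is not part of the comment
--             out.extend([False] * (j - i))
--             i = j
--         elif text.startswith("/*", i):
--             j = text.find("*/", i + 2)
--             j = n if j == -1 else j + 2       # unterminated comment runs to EOF
--             out.extend([False] * (j - i))
--             i = j
--         elif text[i] == '"':
--             j = _string_end(text, i + 1)      # unterminated string runs to EOF
--             out.extend([False] * (j - i))
--             i = j
--         else:
--             out.append(True)
--             i += 1
--     return out
-- ===== Notes on version B (the rewrite author's own statement) =====
-- stated objective: simpler
-- what changed: Replaced the per-character state machine (state/escape flags, index arithmetic, in-place mask writes) by a span scanner that finds the end of each line comment, block comment or string and masks the whole span in one block extend.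
import Mathlib
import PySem

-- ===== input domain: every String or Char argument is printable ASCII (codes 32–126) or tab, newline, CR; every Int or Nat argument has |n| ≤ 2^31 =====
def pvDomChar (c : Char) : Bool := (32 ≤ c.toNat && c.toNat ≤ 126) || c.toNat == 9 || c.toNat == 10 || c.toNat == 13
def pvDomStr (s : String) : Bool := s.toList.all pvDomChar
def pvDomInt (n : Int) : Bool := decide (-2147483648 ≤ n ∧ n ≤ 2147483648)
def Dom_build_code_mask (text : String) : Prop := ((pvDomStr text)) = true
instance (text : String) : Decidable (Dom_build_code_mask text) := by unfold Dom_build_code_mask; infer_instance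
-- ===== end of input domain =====

-- B replaces A's one-character-at-a-time state machine by a span scanner that finds the
-- end of each comment/string region and masks it in one block (simpler decomposition; same cost).

-- ===== PORT A =====
-- A's while-loop over the index with a `state` variable and per-character mask writes,
-- transcribed as structural recursion over the remaining characters carrying the same state.
inductive AState | normal | line | block | str (esc : Bool)

def goA : AState → List Char → List Bool
  | _, [] => []
  | .normal, '/' :: '/' :: r => false :: false :: goA .line r
  | .normal, '/' :: '*' :: r => false :: false :: goA .block r
  | .normal, '"' :: r => false :: goA (.str false) r
  | .normal, _ :: r => true :: goA .normal r
  | .line, c :: r => if c = '\n' then true :: goA .normal r else false :: goA .line r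
  | .block, '*' :: '/' :: r => false :: false :: goA .normal r
  | .block, _ :: r => false :: goA .block r
  | .str true, _ :: r => false :: goA (.str false) r
  | .str false, c :: r =>
      if c = '\\' then false :: goA (.str true) r
      else if c = '"' then false :: goA .normal r
      else false :: goA (.str false) r

def build_code_mask (text : String) : List Bool := goA .normal text.toList

-- ===== PORT B =====
-- Source B: compute the length of each span (line comment / block comment / string),
-- emit a block of `false`s for it at once, and continue after the span.

-- text.find("\n", i): span of the line comment after "//" (newline excluded)
def lineLen (l : List Char) : Nat := (l.takeWhile (· ≠ '\n')).length

-- text.find("*/", i + 2): span after "/*", including "*/", or to EOF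
def blockLen : List Char → Nat
  | [] => 0
  | '*' :: '/' :: _ => 2
  | _ :: r => blockLen r + 1

-- _string_end: span after the opening quote, including the closing quote, or to EOF
def strLen : List Char → Nat
  | [] => 0
  | '\\' :: [] => 1
  | '\\' :: _ :: r => strLen r + 2
  | '"' :: _ => 1
  | _ :: r => strLen r + 1

def goB : List Char → List Bool
  | [] => []
  | '/' :: '/' :: r => List.replicate (lineLen r + 2) false ++ goB (r.drop (lineLen r))
  | '/' :: '*' :: r => List.replicate (blockLen r + 2) false ++ goB (r.drop (blockLen r))
  | '"' :: r => List.replicate (strLen r + 1) false ++ goB (r.drop (strLen r))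
  | _ :: r => true :: goB r
termination_by l => l.length
decreasing_by all_goals (simp <;> omega)

def build_code_mask_alt (text : String) : List Bool := goB text.toList

-- ===== PRECONDITION & SPEC =====
def Spec_build_code_mask (text : String) (out : List Bool) : Prop := out = build_code_mask_alt text
instance (text : String) (out : List Bool) : Decidable (Spec_build_code_mask text out) := by unfold Spec_build_code_mask; infer_instance

-- ===== CLAIM (what is proved, stated in full; the proofs are below) =====
def Claim_equal_build_code_mask : Prop := ∀ (text : String), Dom_build_code_mask text → Spec_build_code_mask text (build_code_mask text)

-- ===== LEMMAS AND PROOFS =====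

theorem goA_line (l : List Char) :
    goA .line l = List.replicate (lineLen l) false ++ goA .normal (l.drop (lineLen l)) := by
  induction l with
  | nil => simp [goA, lineLen]
  | cons c r ih =>
    by_cases h : c = '\n'
    · subst h
      have red : goA .normal ('\n' :: r) = true :: goA .normal r := by
        rw [goA.eq_def]; split <;> simp_all
      simp [goA, lineLen, List.takeWhile, red]
    · simp [goA, lineLen, List.takeWhile, h, List.replicate_succ] at *
      exact ih

theorem goA_block (l : List Char) :
    goA .block l = List.replicate (blockLen l) false ++ goA .normal (l.drop (blockLen l)) := by
  fun_induction blockLen l with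
  | case1 => simp [goA]
  | case2 r => simp [goA, List.replicate_succ]
  | case3 c r h ih =>
    have red : goA .block (c :: r) = false :: goA .block r := by
      rw [goA.eq_def]; split <;> simp_all
    rw [red, ih, blockLen.eq_def]
    split <;> simp_all [List.replicate_succ]

theorem goA_str (l : List Char) :
    goA (.str false) l = List.replicate (strLen l) false ++ goA .normal (l.drop (strLen l)) := by
  fun_induction strLen l with
  | case1 => simp [goA]
  | case2 => simp [goA]
  | case3 c r ih => simp [goA, List.replicate_succ, ih]
  | case4 r => simp [goA, List.replicate_succ]
  | case5 c r h1 h2 h3 ih =>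
    have hc : c ≠ '\\' := by
      intro e; cases r with
      | nil => exact h1 e rfl
      | cons a b => exact h2 a b e rfl
    have hq : c ≠ '"' := fun e => h3 e
    have red : goA (.str false) (c :: r) = false :: goA (.str false) r := by
      simp [goA, hc, hq]
    rw [red, ih, strLen.eq_def]
    split <;> simp_all [List.replicate_succ]

theorem goA_eq_goB (l : List Char) : goA .normal l = goB l := by
  fun_induction goB l with
  | case1 => simp [goA]
  | case2 r ih => simp [goA, goA_line, List.replicate_succ, ih]
  | case3 r ih => simp [goA, goA_block, List.replicate_succ, ih]
  | case4 r ih => simp [goA, goA_str, List.replicate_succ, ih]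
  | case5 c r h1 h2 h3 ih =>
    have red : goA .normal (c :: r) = true :: goA .normal r := by
      rw [goA.eq_def]; split <;> simp_all
    simp [red, ih]


-- ===== VERDICT (by name: the statement is the Claim_ definition above) =====
theorem build_code_mask_spec : Claim_equal_build_code_mask := by
  intro text _
  unfold Spec_build_code_mask build_code_mask build_code_mask_alt
  exact goA_eq_goB _
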